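-- pv_equiv track=rewrite | github.com/jackiehluo/practice | hackerrank/warmups/manasa-and-stones.py | get_treasure
-- ===== SOURCE A (Python) =====
-- def get_treasure(stones, a, b):
--     values = []
--     for j in range(stones):
--         if (j * a + (stones - j - 1) * b) not in values:
--             values.append(j * a + (stones - j - 1) * b)
--     values.sort()
--     values = map(str, values)
--     return values
-- ===== SOURCE B (Python) =====
-- def get_treasure(stones, a, b):
--     # The values j*a + (stones-j-1)*b form an arithmetic progression
--     # base + j*step with base = (stones-1)*b and step = a-b, so no dedup
--     # or sort is needed: emit directly in ascending order.
--     if stones <= 0: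
--         vals = []
--     else:
--         base = (stones - 1) * b
--         step = a - b
--         if step == 0:
--             vals = [base]
--         elif step > 0:
--             vals = [base + j * step for j in range(stones)]
--         else:
--             vals = [base + j * step for j in range(stones - 1, -1, -1)]
--     return map(str, vals)
-- ===== Notes on version B (the rewrite author's own statement) =====
-- stated objective: faster
-- what changed: B recognizes the candidate values as an arithmetic progression (stones-1)*b + j*(a-b), so it emits them directly in ascending order by the sign of a-b (one value when a==b), eliminating A's quadratic membership-dedup loop and the sort.
import Mathlib
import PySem

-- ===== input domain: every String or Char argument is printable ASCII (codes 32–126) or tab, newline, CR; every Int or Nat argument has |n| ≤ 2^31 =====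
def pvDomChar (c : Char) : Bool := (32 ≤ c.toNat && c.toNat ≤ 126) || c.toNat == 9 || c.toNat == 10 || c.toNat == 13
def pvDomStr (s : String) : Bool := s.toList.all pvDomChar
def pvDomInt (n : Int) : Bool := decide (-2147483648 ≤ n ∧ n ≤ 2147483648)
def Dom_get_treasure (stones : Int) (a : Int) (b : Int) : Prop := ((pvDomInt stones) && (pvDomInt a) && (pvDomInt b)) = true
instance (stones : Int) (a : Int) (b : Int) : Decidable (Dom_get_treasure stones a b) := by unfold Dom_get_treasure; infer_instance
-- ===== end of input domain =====

-- B recognizes the values as an arithmetic progression base + j*(a-b) and emits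
-- them directly in ascending order, with no dedup pass and no sort (objective: simpler).

-- ===== PORT A =====
def get_treasure (stones : Int) (a : Int) (b : Int) : List String :=
  let values : List Int :=
    (PySem.List.pyRange 0 stones 1).foldl
      (fun values j =>
        if (j * a + (stones - j - 1) * b) ∉ values then
          values ++ [j * a + (stones - j - 1) * b]
        else values) []
  let values := PySem.List.sorted values (fun x => x) false
  values.map PySem.Int.toStr

-- ===== PORT B =====
def get_treasure_alt (stones : Int) (a : Int) (b : Int) : List String :=
  let vals : List Int :=
    if stones ≤ 0 then []
    else
      let base := (stones - 1) * b
      let step := a - b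
      if step = 0 then [base]
      else if 0 < step then (PySem.List.pyRange 0 stones 1).map (fun j => base + j * step)
      else (PySem.List.pyRange (stones - 1) (-1) (-1)).map (fun j => base + j * step)
  vals.map PySem.Int.toStr

-- ===== PRECONDITION & SPEC =====
def Spec_get_treasure (stones : Int) (a : Int) (b : Int) (out : List String) : Prop := out = get_treasure_alt stones a b
instance (stones : Int) (a : Int) (b : Int) (out : List String) : Decidable (Spec_get_treasure stones a b out) := by unfold Spec_get_treasure; infer_instance

-- ===== CLAIM (what is proved, stated in full; the proofs are below) =====
def Claim_equal_get_treasure : Prop := ∀ (stones : Int) (a : Int) (b : Int), Dom_get_treasure stones a b → Spec_get_treasure stones a b (get_treasure stones a b)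

-- ===== LEMMAS AND PROOFS =====

-- A's dedup loop is set(...) insertion: its body is PySem.Set.add with the branches flipped.
lemma fold_body_eq_add (f : Int → Int) (L : List Int) (s : PySem.Set Int) :
    L.foldl (fun vs j => if f j ∉ vs then vs ++ [f j] else vs) s
      = L.foldl (fun vs j => PySem.Set.add vs (f j)) s := by
  induction L generalizing s with
  | nil => rfl
  | cons x xs ih =>
      simp only [List.foldl_cons, ih]
      congr 1
      rw [PySem.Set.add_eq_ite]
      by_cases h : f x ∈ s <;> simp [h]

lemma fold_eq_ofList_map (f : Int → Int) (L : List Int) :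
    L.foldl (fun vs j => if f j ∉ vs then vs ++ [f j] else vs) []
      = PySem.Set.ofList (L.map f) := by
  rw [fold_body_eq_add, ← PySem.Set.update_map_eq_foldl_add, PySem.Set.update_nil_left]

lemma map_f_eq_map_g (stones a b : Int) :
    (fun j => j * a + (stones - j - 1) * b) = (fun j => (stones - 1) * b + j * (a - b)) := by
  funext j; ring

lemma sorted_nil_id : PySem.List.sorted ([] : List Int) (fun x => x) false = [] := rfl

theorem get_treasure_spec : Claim_equal_get_treasure := by
  intro stones a b _
  unfold Spec_get_treasure get_treasure get_treasure_alt
  rw [fold_eq_ofList_map (fun j => j * a + (stones - j - 1) * b) _, map_f_eq_map_g]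
  by_cases hs : stones ≤ 0
  · rw [PySem.List.pyRange_one_eq_nil (by omega)]
    simp [hs, PySem.Set.ofList, sorted_nil_id]
  · simp only [hs, if_false]
    set g : Int → Int := fun j => (stones - 1) * b + j * (a - b) with hg
    by_cases hstep : a - b = 0
    · -- all values coincide: the set is the singleton [(stones-1)*b]
      have hgconst : ∀ j, g j = (stones - 1) * b := by
        intro j; simp only [hg]; rw [hstep]; ring
      have hcount : (PySem.List.pyRange 0 stones 1).map g
          = List.replicate (PySem.List.pyRange 0 stones 1).length ((stones - 1) * b) := by
        rw [List.eq_replicate_iff]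
        constructor
        · simp
        · intro x hx
          obtain ⟨j, _, rfl⟩ := List.mem_map.mp hx
          exact hgconst j
      rw [hcount, PySem.List.length_pyRange_one]
      have hlen : (stones - 0).toNat = (stones - 0).toNat - 1 + 1 := by omega
      rw [hlen, List.replicate_succ]
      rw [PySem.Set.ofList_cons]
      have : PySem.Set.discard (PySem.Set.ofList (List.replicate ((stones - 0).toNat - 1) ((stones - 1) * b))) ((stones - 1) * b) = [] := by
        have hmem : ∀ y ∈ PySem.Set.discard (PySem.Set.ofList (List.replicate ((stones - 0).toNat - 1) ((stones - 1) * b))) ((stones - 1) * b), False := by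
          intro y hy
          rw [PySem.Set.mem_discard] at hy
          obtain ⟨hy1, hy2⟩ := hy
          rw [PySem.Set.mem_ofList] at hy1
          exact hy2 (List.eq_of_mem_replicate hy1)
        cases h : PySem.Set.discard (PySem.Set.ofList (List.replicate ((stones - 0).toNat - 1) ((stones - 1) * b))) ((stones - 1) * b) with
        | nil => rfl
        | cons z zs => exact absurd (h ▸ List.mem_cons_self) (fun hm => hmem z hm)
      rw [this, if_pos hstep]
      have hsort1 : PySem.List.sorted [(stones - 1) * b] (fun x : Int => x) false = [(stones - 1) * b] := rfl
      rw [hsort1]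
    · -- step ≠ 0: g is injective on the range, list already has distinct values
      have hinj : Function.Injective g := by
        intro x y hxy
        simp only [hg] at hxy
        have : x * (a - b) = y * (a - b) := by linarith
        exact mul_right_cancel₀ hstep this
      have hnodup : ((PySem.List.pyRange 0 stones 1).map g).Nodup :=
        (PySem.List.nodup_pyRange_one 0 stones).map hinj
      rw [PySem.Set.ofList_eq_self_of_nodup _ hnodup]
      rw [if_neg hstep]
      by_cases hpos : 0 < a - b
      · rw [if_pos hpos]
        congr 1
        apply PySem.List.sorted_eq_of_perm_of_pairwise_lt _ _ _ (List.Perm.refl _)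
        rw [List.pairwise_map]
        exact (PySem.List.pairwise_lt_pyRange_one 0 stones).imp
          (fun hlt => by simp only [hg]; nlinarith)
      · rw [if_neg hpos]
        have hneg : a - b < 0 := by omega
        have hrev : PySem.List.pyRange (stones - 1) (-1) (-1)
            = (PySem.List.pyRange 0 stones 1).reverse := by
          have := PySem.List.pyRange_neg_one_eq_reverse (stones - 1) (-1)
          simpa using this
        rw [hrev, List.map_reverse]
        congr 1
        apply PySem.List.sorted_eq_of_perm_of_pairwise_lt _ _ _ (List.reverse_perm _)
        rw [List.pairwise_reverse, List.pairwise_map]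
        exact (PySem.List.pairwise_lt_pyRange_one 0 stones).imp
          (fun hlt => by simp only [hg]; nlinarith)
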